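-- pv_equiv track=rewrite | github.com/UnicodeTreason/AdventOfCode | adventofcode/year2015/day08.py | part_two
-- ===== SOURCE A (Python) =====
-- def part_two(input_data: list) -> int:
--     """Calculate
--
--     Parameters
--     ----------
--     input_data: list
--         List of strings containing the following elements:
--             double-quoted string literals: "abc"
--             escape sequences:
--                 \\ (which represents a single backslash)
--                 \" (which represents a lone double-quote character)
--                 \ x plus two hexadecimal characters (which represents a single character with that ASCII code)
--
--     Returns
--     -------
--     characters_recoded - characters_code: int
--     """
--
--     characters_recoded = 0
--     characters_code = 0
--
--     # Process Input
--     for escaped_string in input_data: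
--         # Count of characters at the code level
--         characters_code += len(escaped_string)
--
--         # Count of characters after recoding
--         # Replace backslash with escaped backslash
--         escaped_string = escaped_string.replace('\\', r'\\')
--         # Replace quote with escaped quote
--         escaped_string = escaped_string.replace(r'"', r'\"')
--         # Add outside quotes
--         escaped_string = '"' + escaped_string + '"'
--         # Add count
--         characters_recoded += len(escaped_string)
--     return characters_recoded - characters_code
-- ===== SOURCE B (Python) =====
-- def part_two(input_data: list) -> int:
--     # Closed form: each line's re-encoding adds exactly 2 outer quotes
--     # plus one extra character per backslash and per double-quote.
--     total = 0
--     for s in input_data: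
--         extra = 2
--         for c in s:
--             if c == '\\' or c == '"':
--                 extra += 1
--         total += extra
--     return total
-- ===== Notes on version B (the rewrite author's own statement) =====
-- stated objective: simpler
-- what changed: B never builds the re-encoded strings: it uses the closed form that each line adds 2 plus one per backslash/quote character, summed in a single character scan, instead of A's two replace passes plus length subtraction.
import Mathlib
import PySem

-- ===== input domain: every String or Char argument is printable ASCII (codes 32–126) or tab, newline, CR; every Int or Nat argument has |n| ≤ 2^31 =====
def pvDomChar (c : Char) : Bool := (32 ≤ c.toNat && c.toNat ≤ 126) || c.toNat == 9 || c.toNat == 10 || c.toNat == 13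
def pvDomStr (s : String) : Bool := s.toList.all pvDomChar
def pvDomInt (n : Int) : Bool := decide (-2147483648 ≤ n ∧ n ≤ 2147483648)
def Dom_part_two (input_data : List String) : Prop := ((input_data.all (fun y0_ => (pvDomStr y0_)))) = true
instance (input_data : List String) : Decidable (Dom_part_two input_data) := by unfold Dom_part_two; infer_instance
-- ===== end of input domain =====

-- B replaces A's build-and-measure re-encoding (two replace passes, outer quotes, length subtraction)
-- by the closed form "each line adds 2 plus one per backslash or double-quote", summed in one character scan.


-- ===== PORT A =====
-- literal transliteration of A: running pair (characters_recoded, characters_code),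
-- per line: code += len(s); s := s.replace('\','\\').replace('"','\"'); s := '"'+s+'"'; recoded += len(s)
def part_two (input_data : List String) : Int :=
  let st := input_data.foldl (fun (st : Int × Int) escaped_string =>
    let characters_code := st.2 + (PySem.Str.len escaped_string : Int)
    let s1 := PySem.Str.replace escaped_string "\\" "\\\\"
    let s2 := PySem.Str.replace s1 "\"" "\\\""
    let s3 := "\"" ++ s2 ++ "\""
    (st.1 + (PySem.Str.len s3 : Int), characters_code)) (0, 0)
  st.1 - st.2

-- ===== PORT B =====
-- literal transliteration of B: one scan, extra = 2 plus 1 per backslash/quote, summed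
def part_two_alt (input_data : List String) : Int :=
  input_data.foldl (fun total s =>
    total + s.toList.foldl (fun extra c =>
      if c = '\\' ∨ c = '"' then extra + 1 else extra) (2 : Int)) 0

-- ===== PRECONDITION & SPEC =====
def Spec_part_two (input_data : List String) (out : Int) : Prop := out = part_two_alt input_data
instance (input_data : List String) (out : Int) : Decidable (Spec_part_two input_data out) := by unfold Spec_part_two; infer_instance

-- ===== CLAIM (what is proved, stated in full; the proofs are below) =====
def Claim_equal_part_two : Prop := ∀ (input_data : List String), Dom_part_two input_data → Spec_part_two input_data (part_two input_data)

-- ===== LEMMAS AND PROOFS =====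

-- replace with a single-character pattern is a per-character flatMap
theorem replace_go_single (o : Char) (new : List Char) :
    ∀ (l : List Char) (fuel : Nat) (acc : List Char), l.length ≤ fuel →
    PySem.Chars.replace.go [o] new fuel l acc
      = acc.reverse ++ l.flatMap (fun c => if c = o then new else [c]) := by
  intro l
  induction l with
  | nil =>
    intro fuel acc _
    cases fuel <;> simp [PySem.Chars.replace.go]
  | cons c t ih =>
    intro fuel acc hf
    cases fuel with
    | zero => simp at hf
    | succ fuel =>
      simp only [List.length_cons, Nat.succ_le_succ_iff] at hf
      by_cases h : c = o
      · subst h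
        have hp : List.isPrefixOf [c] (c :: t) = true := by simp [List.isPrefixOf]
        rw [PySem.Chars.replace.go, if_pos hp]
        simp only [List.length_singleton, List.drop_succ_cons, List.drop_zero]
        rw [ih fuel _ hf]
        simp
      · have hp : List.isPrefixOf [o] (c :: t) = false := by
          simp [List.isPrefixOf]; exact fun hh => h hh.symm
        rw [PySem.Chars.replace.go, if_neg (by simp [hp])]
        rw [ih fuel _ hf]
        simp [h]

theorem replace_single (cs : List Char) (o : Char) (new : List Char) :
    PySem.Chars.replace cs [o] new = cs.flatMap (fun c => if c = o then new else [c]) := by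
  have := replace_go_single o new cs cs.length [] (le_refl _)
  simpa [PySem.Chars.replace] using this

-- length of the doubly-escaped line body
theorem encoded_len (cs : List Char) :
    (PySem.Chars.replace (PySem.Chars.replace cs ['\\'] ['\\','\\']) ['"'] ['\\','"']).length
      = cs.length + cs.countP (fun c => decide (c = '\\' ∨ c = '"')) := by
  rw [replace_single, replace_single, List.flatMap_assoc]
  induction cs with
  | nil => simp
  | cons c t ih =>
    simp only [List.flatMap_cons, List.length_append, List.countP_cons, List.length_cons]
    rw [ih]
    by_cases h1 : c = '\\'
    · subst h1
      have hc : ((fun c => List.flatMap (fun c => if c = '"' then ['\\','"'] else [c])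
          (if c = '\\' then ['\\','\\'] else [c])) '\\').length = 2 := by decide
      rw [hc]
      norm_num
      omega
    · by_cases h2 : c = '"'
      · subst h2
        have hc : ((fun c => List.flatMap (fun c => if c = '"' then ['\\','"'] else [c])
            (if c = '\\' then ['\\','\\'] else [c])) '"').length = 2 := by decide
        rw [hc]
        norm_num
        omega
      · have hc : ((fun c => List.flatMap (fun c => if c = '"' then ['\\','"'] else [c])
            (if c = '\\' then ['\\','\\'] else [c])) c).length = 1 := by
          simp [if_neg h1, if_neg h2]
        rw [hc]
        have h4 : ¬(c = '\\' ∨ c = '"') := by tauto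
        simp only [decide_eq_true_eq, if_neg h4]
        omega

-- B's inner character scan computes 2 + (number of backslashes and quotes)
theorem inner_scan (cs : List Char) :
    cs.foldl (fun extra c => if c = '\\' ∨ c = '"' then extra + 1 else extra) (2 : Int)
      = 2 + (cs.countP (fun c => decide (c = '\\' ∨ c = '"')) : Int) :=
  PySem.List.foldl_ite_add_one (fun c => c = '\\' ∨ c = '"') cs 2

-- per line, A's recoded-minus-code difference equals B's scan value
theorem line_diff (s : String) :
    (PySem.Str.len ("\"" ++ PySem.Str.replace (PySem.Str.replace s "\\" "\\\\") "\"" "\\\"" ++ "\"") : Int)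
      - (PySem.Str.len s : Int)
      = s.toList.foldl (fun extra ch => if ch = '\\' ∨ ch = '"' then extra + 1 else extra) (2 : Int) := by
  have henc := encoded_len s.toList
  rw [inner_scan]
  simp only [PySem.Str.len, PySem.Str.replace,
    String.toList_append, String.toList_ofList, List.length_append]
  have h1 : ("\"" : String).toList.length = 1 := by decide
  have h2 : ("\\" : String).toList = ['\\'] := by decide
  have h3 : ("\\\\" : String).toList = ['\\','\\'] := by decide
  have h4 : ("\"" : String).toList = ['"'] := by decide
  have h5 : ("\\\"" : String).toList = ['\\','"'] := by decide
  rw [h2, h3, h4, h5]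
  simp only [List.length_cons, List.length_nil]
  omega

-- the pair-fold of A against the sum-fold of B
theorem fold_agree (l : List String) :
    ∀ (r c : Int),
    (l.foldl (fun (st : Int × Int) escaped_string =>
        (st.1 + (PySem.Str.len ("\"" ++ PySem.Str.replace (PySem.Str.replace escaped_string "\\" "\\\\") "\"" "\\\"" ++ "\"") : Int),
         st.2 + (PySem.Str.len escaped_string : Int))) (r, c)).1
      - (l.foldl (fun (st : Int × Int) escaped_string =>
        (st.1 + (PySem.Str.len ("\"" ++ PySem.Str.replace (PySem.Str.replace escaped_string "\\" "\\\\") "\"" "\\\"" ++ "\"") : Int),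
         st.2 + (PySem.Str.len escaped_string : Int))) (r, c)).2
      = r - c + l.foldl (fun total s =>
          total + s.toList.foldl (fun extra ch =>
            if ch = '\\' ∨ ch = '"' then extra + 1 else extra) (2 : Int)) 0 := by
  induction l with
  | nil => intro r c; simp
  | cons s t ih =>
    intro r c
    simp only [List.foldl_cons]
    rw [ih]
    rw [PySem.List.foldl_add t (fun s => s.toList.foldl (fun extra ch =>
          if ch = '\\' ∨ ch = '"' then extra + 1 else extra) (2 : Int)) 0,
        PySem.List.foldl_add t (fun s => s.toList.foldl (fun extra ch =>
          if ch = '\\' ∨ ch = '"' then extra + 1 else extra) (2 : Int))]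
    have := line_diff s
    omega

-- ===== VERDICT (by name: the statement is the Claim_ definition above) =====
theorem part_two_spec : Claim_equal_part_two := by
  intro input_data _
  unfold Spec_part_two part_two part_two_alt
  have := fold_agree input_data 0 0
  simp only [sub_zero, zero_add] at this ⊢
  exact this
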